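-- pv_equiv track=rewrite | github.com/CDBiddulph/scaffold-learning | experiments/keep_crosswords_20250711_195402/scaffolds/5-1-2-0-0-0-1/scaffold.py | get_crossing_constraints
-- ===== SOURCE A (Python) =====
-- def find_clue_position(clue_num, grid):
--     """Find the starting position of a clue in the grid"""
--     height = len(grid)
--     width = len(grid[0]) if height > 0 else 0
--     current_num = 1
--
--     for row in range(height):
--         for col in range(width):
--             if grid[row][col] == ".":
--                 continue
--
--             starts_across = (
--                 (col == 0 or grid[row][col - 1] == ".")
--                 and col + 1 < width
--                 and grid[row][col + 1] != "."
--             )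
--             starts_down = (
--                 (row == 0 or grid[row - 1][col] == ".")
--                 and row + 1 < height
--                 and grid[row + 1][col] != "."
--             )
--
--             if starts_across or starts_down:
--                 if current_num == clue_num:
--                     return (row, col)
--                 current_num += 1
--
--     return None
--
-- def get_clue_length(clue_num, grid, direction):
--     """Get the length of a clue based on grid structure"""
--     pos = find_clue_position(clue_num, grid)
--     if pos is None:
--         return None
--
--     row, col = pos
--     height = len(grid)
--     width = len(grid[0]) if height > 0 else 0
--
--     if direction == 'across':
--         length = 0
--         for c in range(col, width):
--             if grid[row][c] == ".":
--                 break
--             length += 1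
--         return length
--     else:  # down
--         length = 0
--         for r in range(row, height):
--             if grid[r][col] == ".":
--                 break
--             length += 1
--         return length
--
-- def get_crossing_constraints(clue_num, direction, answers, grid):
--     """Get letter constraints from crossing clues"""
--     constraints = {}
--
--     pos = find_clue_position(clue_num, grid)
--     if not pos:
--         return constraints
--
--     row, col = pos
--     length = get_clue_length(clue_num, grid, direction)
--     if not length:
--         return constraints
--
--     # Find crossing answers
--     for (cross_num, cross_dir), answer in answers.items():
--         if cross_dir == direction:
--             continue
--
--         cross_pos = find_clue_position(cross_num, grid)
--         if not cross_pos: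
--             continue
--
--         cross_row, cross_col = cross_pos
--
--         if direction == 'across':
--             # Check if down clue crosses this across clue
--             if cross_col >= col and cross_col < col + length:
--                 if cross_row <= row and row < cross_row + len(answer):
--                     # They intersect
--                     across_pos = cross_col - col
--                     down_pos = row - cross_row
--                     if 0 <= across_pos < length and 0 <= down_pos < len(answer):
--                         constraints[across_pos] = answer[down_pos]
--         else:  # down
--             # Check if across clue crosses this down clue
--             if cross_row >= row and cross_row < row + length:
--                 if cross_col <= col and col < cross_col + len(answer):
--                     # They intersect
--                     down_pos = cross_row - row
--                     across_pos = col - cross_col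
--                     if 0 <= down_pos < length and 0 <= across_pos < len(answer):
--                         constraints[down_pos] = answer[across_pos]
--
--     return constraints
-- ===== SOURCE B (Python) =====
-- def get_crossing_constraints(clue_num, direction, answers, grid):
--     """Get letter constraints from crossing clues"""
--     height = len(grid)
--     width = len(grid[0]) if height > 0 else 0
--     # One pass over the grid: number every clue start (A re-scans the grid per answer).
--     positions = {}
--     num = 1
--     for r in range(height):
--         for c in range(width):
--             if grid[r][c] == ".":
--                 continue
--             starts_across = (c == 0 or grid[r][c - 1] == ".") and c + 1 < width and grid[r][c + 1] != "."
--             starts_down = (r == 0 or grid[r - 1][c] == ".") and r + 1 < height and grid[r + 1][c] != "."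
--             if starts_across or starts_down:
--                 positions[num] = (r, c)
--                 num += 1
--     if clue_num not in positions:
--         return {}
--     row, col = positions[clue_num]
--     # Map each cell of the target clue to its offset along the clue.
--     cell_off = {}
--     if direction == 'across':
--         for c in range(col, width):
--             if grid[row][c] == ".":
--                 break
--             cell_off[(row, c)] = c - col
--     else:
--         for r in range(row, height):
--             if grid[r][col] == ".":
--                 break
--             cell_off[(r, col)] = r - row
--     # Lay every perpendicular answer onto the board; keep letters landing on target cells.
--     constraints = {}
--     for (cross_num, cross_dir), answer in answers.items():
--         if cross_dir == direction:
--             continue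
--         if cross_num not in positions:
--             continue
--         r0, c0 = positions[cross_num]
--         for i, ch in enumerate(answer):
--             cell = (r0 + i, c0) if direction == 'across' else (r0, c0 + i)
--             off = cell_off.get(cell)
--             if off is not None:
--                 constraints[off] = ch
--     return constraints
-- ===== Notes on version B (the rewrite author's own statement) =====
-- stated objective: alternative
-- what changed: B numbers all clue starts in one grid pass into a positions dict and precomputes a cell->offset map for the target clue, then lays each perpendicular answer onto the board and reads constraints off the cell map, instead of A's per-answer full-grid rescan (find_clue_position called inside the answers loop) with pairwise intersection arithmetic.
-- outside the precondition, e.g. on get_crossing_constraints(1, 'across', {}, ['AB', 'A']): A returns {}, B raises IndexError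
import Mathlib
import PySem

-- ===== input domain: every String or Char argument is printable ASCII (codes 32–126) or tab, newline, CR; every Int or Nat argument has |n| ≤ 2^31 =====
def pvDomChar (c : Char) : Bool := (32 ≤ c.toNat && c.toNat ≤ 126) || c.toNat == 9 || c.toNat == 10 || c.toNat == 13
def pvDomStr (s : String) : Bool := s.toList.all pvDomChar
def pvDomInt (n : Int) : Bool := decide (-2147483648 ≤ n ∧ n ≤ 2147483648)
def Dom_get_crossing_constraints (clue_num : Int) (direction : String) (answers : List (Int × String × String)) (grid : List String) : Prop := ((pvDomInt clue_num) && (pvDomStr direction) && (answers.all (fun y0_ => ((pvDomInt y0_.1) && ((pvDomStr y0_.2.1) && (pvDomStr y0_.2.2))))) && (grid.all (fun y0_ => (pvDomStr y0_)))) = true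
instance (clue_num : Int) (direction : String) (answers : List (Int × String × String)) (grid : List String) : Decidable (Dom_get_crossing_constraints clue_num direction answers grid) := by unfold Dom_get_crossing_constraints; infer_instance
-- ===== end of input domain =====

-- B replaces A's per-answer full-grid rescan and intersection arithmetic by a one-pass clue-position
-- index plus a cell→offset map of the target clue (objective: alternative algorithm, same result).

-- ===== PORT A =====
-- shared cell access: grid[r][c] (both Pythons contain this exact expression; in range under Pre_)
def pvCell (grid : List String) (r c : Int) : Char :=
  PySem.List.pyGetD (PySem.List.pyGetD (grid.map String.toList) r []) c ' '

-- len(grid[0]) if height > 0 else 0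
def pvGridW (grid : List String) : Int :=
  if (0 : Int) < (grid.length : Int) then ((grid.headD "").toList.length : Int) else 0

-- starts_across or starts_down (identical expression in A and B)
def pvIsStart (grid : List String) (h w r c : Int) : Bool :=
  ((c == 0 || pvCell grid r (c - 1) == '.') && decide (c + 1 < w) && !(pvCell grid r (c + 1) == '.'))
  || ((r == 0 || pvCell grid (r - 1) c == '.') && decide (r + 1 < h) && !(pvCell grid (r + 1) c == '.'))

-- one iteration of A's find_clue_position scan (early return = result already set)
def pvScanStepA (clue_num : Int) (grid : List String) (h w : Int)
    (st : Int × Option (Int × Int)) (rc : Int × Int) : Int × Option (Int × Int) :=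
  if st.2.isSome then st
  else if pvCell grid rc.1 rc.2 == '.' then st
  else if pvIsStart grid h w rc.1 rc.2 then
    (if st.1 == clue_num then (st.1, some rc) else (st.1 + 1, none))
  else st

def findCluePos (clue_num : Int) (grid : List String) : Option (Int × Int) :=
  ((PySem.List.pyRange 0 (grid.length : Int) 1).foldl (fun st r =>
    (PySem.List.pyRange 0 (pvGridW grid) 1).foldl (fun st c =>
      pvScanStepA clue_num grid (grid.length : Int) (pvGridW grid) st (r, c)) st)
    ((1 : Int), (none : Option (Int × Int)))).2

-- a 'for … : if p: break; else f' loop (used by A's length count and B's cell_off build)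
def pvBreakFold {σ : Type} (p : Int → Bool) (f : σ → Int → σ) (L : List Int) (s0 : σ) : σ :=
  (L.foldl (fun s c => if s.1 then s else if p c then (true, s.2) else (s.1, f s.2 c)) (false, s0)).2

def clueLen (clue_num : Int) (grid : List String) (direction : String) : Option Int :=
  match findCluePos clue_num grid with
  | none => none
  | some (row, col) =>
    if direction == "across" then
      some (pvBreakFold (fun c => pvCell grid row c == '.') (fun n _ => n + 1)
        (PySem.List.pyRange col (pvGridW grid) 1) (0 : Int))
    else
      some (pvBreakFold (fun r => pvCell grid r col == '.') (fun n _ => n + 1)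
        (PySem.List.pyRange row (grid.length : Int) 1) (0 : Int))

def get_crossing_constraints (clue_num : Int) (direction : String) (answers : List (Int × String × String)) (grid : List String) : List (Int × String) :=
  let d := answers.foldl (fun d t => d.insert (t.1, t.2.1) t.2.2)
    (PySem.Dict.empty (κ := Int × String) (ν := String))
  match findCluePos clue_num grid with
  | none => []
  | some (row, col) =>
    match clueLen clue_num grid direction with
    | none => []
    | some length =>
      if length == 0 then []
      else
        (d.items.foldl (fun cons item =>
          if item.1.2 == direction then cons
          else
            match findCluePos item.1.1 grid with
            | none => cons
            | some (r0, c0) =>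
              let chars := item.2.toList
              if direction == "across" then
                if decide (c0 ≥ col) && decide (c0 < col + length) then
                  if decide (r0 ≤ row) && decide (row < r0 + (chars.length : Int)) then
                    if decide (0 ≤ c0 - col) && decide (c0 - col < length) &&
                       decide (0 ≤ row - r0) && decide (row - r0 < (chars.length : Int)) then
                      cons.insert (c0 - col) (String.ofList [PySem.List.pyGetD chars (row - r0) ' '])
                    else cons
                  else cons
                else cons
              else
                if decide (r0 ≥ row) && decide (r0 < row + length) then
                  if decide (c0 ≤ col) && decide (col < c0 + (chars.length : Int)) then
                    if decide (0 ≤ r0 - row) && decide (r0 - row < length) &&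
                       decide (0 ≤ col - c0) && decide (col - c0 < (chars.length : Int)) then
                      cons.insert (r0 - row) (String.ofList [PySem.List.pyGetD chars (col - c0) ' '])
                    else cons
                  else cons
                else cons)
          (PySem.Dict.empty (κ := Int) (ν := String))).items

-- ===== PORT B =====
-- one iteration of B's numbering pass
def pvScanStepB (grid : List String) (h w : Int)
    (st : Int × PySem.Dict Int (Int × Int)) (rc : Int × Int) : Int × PySem.Dict Int (Int × Int) :=
  if pvCell grid rc.1 rc.2 == '.' then st
  else if pvIsStart grid h w rc.1 rc.2 then (st.1 + 1, st.2.insert st.1 rc)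
  else st

def pvPositions (grid : List String) : PySem.Dict Int (Int × Int) :=
  ((PySem.List.pyRange 0 (grid.length : Int) 1).foldl (fun st r =>
    (PySem.List.pyRange 0 (pvGridW grid) 1).foldl (fun st c =>
      pvScanStepB grid (grid.length : Int) (pvGridW grid) st (r, c)) st)
    ((1 : Int), (PySem.Dict.empty : PySem.Dict Int (Int × Int)))).2

def pvCellOff (grid : List String) (direction : String) (row col : Int) : PySem.Dict (Int × Int) Int :=
  if direction == "across" then
    pvBreakFold (fun c => pvCell grid row c == '.') (fun d c => d.insert (row, c) (c - col))
      (PySem.List.pyRange col (pvGridW grid) 1) PySem.Dict.empty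
  else
    pvBreakFold (fun r => pvCell grid r col == '.') (fun d r => d.insert (r, col) (r - row))
      (PySem.List.pyRange row (grid.length : Int) 1) PySem.Dict.empty

def get_crossing_constraints_alt (clue_num : Int) (direction : String) (answers : List (Int × String × String)) (grid : List String) : List (Int × String) :=
  let d := answers.foldl (fun d t => d.insert (t.1, t.2.1) t.2.2)
    (PySem.Dict.empty (κ := Int × String) (ν := String))
  let pos := pvPositions grid
  match pos.get? clue_num with
  | none => []
  | some (row, col) =>
    let co := pvCellOff grid direction row col
    (d.items.foldl (fun cons item =>
      if item.1.2 == direction then cons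
      else
        match pos.get? item.1.1 with
        | none => cons
        | some (r0, c0) =>
          (PySem.List.enumerate item.2.toList 0).foldl (fun cons ic =>
            match co.get? (if direction == "across" then (r0 + ic.1, c0) else (r0, c0 + ic.1)) with
            | some off => cons.insert off (String.ofList [ic.2])
            | none => cons) cons)
      (PySem.Dict.empty (κ := Int) (ν := String))).items

-- ===== PRECONDITION & SPEC =====
-- Pre_ restricts to grids whose every row is at least as long as the first row: on other (ragged)
-- grids Python's grid[r][c] indexing raises IndexError during the scans, and whether A returns at
-- all there depends only on how far its early-returning scan happens to get before the short row.
def Pre_get_crossing_constraints (clue_num : Int) (direction : String) (answers : List (Int × String × String)) (grid : List String) : Prop :=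
  ∀ s ∈ grid, (grid.headD "").toList.length ≤ s.toList.length
instance (clue_num : Int) (direction : String) (answers : List (Int × String × String)) (grid : List String) : Decidable (Pre_get_crossing_constraints clue_num direction answers grid) := by unfold Pre_get_crossing_constraints; infer_instance

def pvWitness_get_crossing_constraints : Int × String × (List (Int × String × String)) × List String :=
  (1, "across", [(2, "down", "AB")], ["AB", "AB"])

def Spec_get_crossing_constraints (clue_num : Int) (direction : String) (answers : List (Int × String × String)) (grid : List String) (out : List (Int × String)) : Prop := out = get_crossing_constraints_alt clue_num direction answers grid
instance (clue_num : Int) (direction : String) (answers : List (Int × String × String)) (grid : List String) (out : List (Int × String)) : Decidable (Spec_get_crossing_constraints clue_num direction answers grid out) := by unfold Spec_get_crossing_constraints; infer_instance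

-- ===== CLAIM (what is proved, stated in full; the proofs are below) =====
def Claim_equal_get_crossing_constraints : Prop := ∀ (clue_num : Int) (direction : String) (answers : List (Int × String × String)) (grid : List String), Dom_get_crossing_constraints clue_num direction answers grid → Pre_get_crossing_constraints clue_num direction answers grid → Spec_get_crossing_constraints clue_num direction answers grid (get_crossing_constraints clue_num direction answers grid)


-- ===== LEMMAS AND PROOFS =====

-- once the break flag is set, the loop state is frozen
lemma pvBreak_frozen {σ : Type} (p : Int → Bool) (f : σ → Int → σ) :
    ∀ (L : List Int) (x : σ),
      L.foldl (fun s c => if s.1 then s else if p c then (true, s.2) else (s.1, f s.2 c)) (true, x)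
        = (true, x) := by
  intro L
  induction L with
  | nil => intro x; rfl
  | cons a L ih => intro x; simpa using ih x

-- a break-loop is a fold over the takeWhile prefix
lemma pvBreakFold_eq {σ : Type} (p : Int → Bool) (f : σ → Int → σ) :
    ∀ (L : List Int) (s0 : σ),
      pvBreakFold p f L s0 = (L.takeWhile (fun c => !p c)).foldl f s0 := by
  intro L
  induction L with
  | nil => intro s0; rfl
  | cons a L ih =>
      intro s0
      by_cases hpa : p a
      · simp [pvBreakFold, hpa, pvBreak_frozen]
      · simpa [pvBreakFold, List.takeWhile_cons, hpa] using ih (f s0 a)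

-- a nested row/col loop is a single loop over the flattened cell list
lemma foldl_nested {σ : Type} (f : σ → Int × Int → σ) :
    ∀ (rows cols : List Int) (init : σ),
      rows.foldl (fun s r => cols.foldl (fun s c => f s (r, c)) s) init
        = (rows.flatMap (fun r => cols.map (fun c => (r, c)))).foldl f init := by
  intro rows
  induction rows with
  | nil => intros; rfl
  | cons r rows ih =>
      intro cols init
      simp only [List.flatMap_cons, List.foldl_append, List.foldl_cons, List.foldl_map]
      exact ih cols _

-- relation between A's early-return scan state and B's numbering state
def pvScanInv (clue : Int) (a : Int × Option (Int × Int)) (b : Int × PySem.Dict Int (Int × Int)) : Prop :=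
  (a.2 = none → a.1 = b.1 ∧ (clue ≤ 0 ∨ b.1 ≤ clue) ∧ b.2.get? clue = none) ∧
  (∀ p, a.2 = some p → clue < b.1 ∧ b.2.get? clue = some p)

lemma scan_step_inv (clue : Int) (grid : List String) (h w : Int)
    (a : Int × Option (Int × Int)) (b : Int × PySem.Dict Int (Int × Int)) (rc : Int × Int)
    (hab : pvScanInv clue a b) :
    pvScanInv clue (pvScanStepA clue grid h w a rc) (pvScanStepB grid h w b rc) := by
  obtain ⟨h1, h2⟩ := hab
  rcases a with ⟨na, ra⟩
  rcases b with ⟨nb, db⟩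
  unfold pvScanStepA pvScanStepB
  by_cases hdot : pvCell grid rc.1 rc.2 == '.'
  · cases ra with
    | none => simp only [hdot, if_true, Option.isSome_none, Bool.false_eq_true, if_false]; exact ⟨h1, h2⟩
    | some p => simp only [hdot, if_true, Option.isSome_some, if_true]; exact ⟨h1, h2⟩
  · by_cases hst : pvIsStart grid h w rc.1 rc.2
    · cases ra with
      | some p =>
          obtain ⟨hlt, hget⟩ := h2 p rfl
          simp only [hdot, hst, Option.isSome_some, if_true, if_false, Bool.false_eq_true]
          constructor
          · intro hnone; simp at hnone
          · intro q hq
            simp only [Option.some.injEq] at hq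
            subst hq
            refine ⟨by omega, ?_⟩
            rw [PySem.Dict.get?_insert_of_ne db _ (by omega)]
            exact hget
      | none =>
          obtain ⟨hnum, hcl, hget⟩ := h1 rfl
          subst hnum
          by_cases hc : na == clue
          · have hnac : na = clue := by simpa using hc
            subst hnac
            simp only [hdot, hst, Option.isSome_none, Bool.false_eq_true, if_false, if_true, hc]
            constructor
            · intro hnone; simp at hnone
            · intro q hq
              simp only [Option.some.injEq] at hq
              exact ⟨by omega, by rw [← hq]; exact PySem.Dict.get?_insert_self _ _ _⟩
          · have hne : na ≠ clue := by simpa using hc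
            simp only [hdot, hst, Option.isSome_none, Bool.false_eq_true, if_false, if_true, hc]
            constructor
            · intro _
              refine ⟨rfl, by omega, ?_⟩
              rw [PySem.Dict.get?_insert_of_ne db _ (Ne.symm hne)]
              exact hget
            · intro q hq; simp at hq
    · cases ra with
      | none => simp only [hdot, hst, Option.isSome_none, Bool.false_eq_true, if_false]; exact ⟨h1, h2⟩
      | some p => simp only [hdot, hst, Option.isSome_some, if_true]; exact ⟨h1, h2⟩

lemma scan_fold_inv (clue : Int) (grid : List String) (h w : Int) :
    ∀ (L : List (Int × Int)) (a : Int × Option (Int × Int)) (b : Int × PySem.Dict Int (Int × Int)),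
      pvScanInv clue a b →
      pvScanInv clue (L.foldl (pvScanStepA clue grid h w) a) (L.foldl (pvScanStepB grid h w) b) := by
  intro L
  induction L with
  | nil => intro a b hab; exact hab
  | cons x L ih =>
      intro a b hab
      exact ih _ _ (scan_step_inv clue grid h w a b x hab)

-- A's find_clue_position is a lookup in B's positions index
lemma findCluePos_eq_positions (n : Int) (grid : List String) :
    findCluePos n grid = (pvPositions grid).get? n := by
  unfold findCluePos pvPositions
  rw [foldl_nested (pvScanStepA n grid (grid.length : Int) (pvGridW grid)),
      foldl_nested (pvScanStepB grid (grid.length : Int) (pvGridW grid))]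
  have hinit : pvScanInv n ((1 : Int), (none : Option (Int × Int)))
      ((1 : Int), (PySem.Dict.empty : PySem.Dict Int (Int × Int))) := by
    refine ⟨fun _ => ⟨rfl, by omega, ?_⟩, fun p hp => by simp at hp⟩
    simp [PySem.Dict.get?_empty]
  have h := scan_fold_inv n grid (grid.length : Int) (pvGridW grid)
    (((PySem.List.pyRange 0 (grid.length : Int) 1).flatMap
      (fun r => (PySem.List.pyRange 0 (pvGridW grid) 1).map (fun c => (r, c)))))
    _ _ hinit
  set a := ((PySem.List.pyRange 0 (grid.length : Int) 1).flatMap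
      (fun r => (PySem.List.pyRange 0 (pvGridW grid) 1).map (fun c => (r, c)))).foldl
      (pvScanStepA n grid (grid.length : Int) (pvGridW grid)) ((1 : Int), none) with ha
  set b := ((PySem.List.pyRange 0 (grid.length : Int) 1).flatMap
      (fun r => (PySem.List.pyRange 0 (pvGridW grid) 1).map (fun c => (r, c)))).foldl
      (pvScanStepB grid (grid.length : Int) (pvGridW grid)) ((1 : Int), PySem.Dict.empty) with hb
  cases hra : a.2 with
  | none => rw [(h.1 hra).2.2]
  | some p => rw [(h.2 p hra).2]

-- a found clue start is a live in-range cell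
def pvCellOK (grid : List String) (p : Int × Int) : Prop :=
  ¬ (pvCell grid p.1 p.2 == '.') = true ∧ p.1 < (grid.length : Int) ∧ p.2 < pvGridW grid

lemma scan_fold_val (clue : Int) (grid : List String) (h w : Int)
    (hh : h ≤ (grid.length : Int)) (hw : w ≤ pvGridW grid) :
    ∀ (L : List (Int × Int)) (a : Int × Option (Int × Int)),
      (∀ p, a.2 = some p → pvCellOK grid p) →
      (∀ q ∈ L, q.1 < h ∧ q.2 < w) →
      ∀ p, (L.foldl (pvScanStepA clue grid h w) a).2 = some p → pvCellOK grid p := by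
  intro L
  induction L with
  | nil => intro a ha _ p hp; exact ha p hp
  | cons x L ih =>
      intro a ha hmem p hp
      refine ih _ ?_ (fun q hq => hmem q (List.mem_cons_of_mem _ hq)) p hp
      intro q hq
      unfold pvScanStepA at hq
      by_cases hs : a.2.isSome
      · rw [if_pos hs] at hq; exact ha q hq
      · rw [if_neg hs] at hq
        by_cases hdot : pvCell grid x.1 x.2 == '.'
        · rw [if_pos hdot] at hq; exact ha q hq
        · rw [if_neg hdot] at hq
          by_cases hst : pvIsStart grid h w x.1 x.2
          · rw [if_pos hst] at hq
            by_cases hc : a.1 == clue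
            · rw [if_pos hc] at hq
              simp only [Option.some.injEq] at hq
              subst hq
              have := hmem x (List.mem_cons_self)
              exact ⟨hdot, by omega, by omega⟩
            · rw [if_neg hc] at hq; simp at hq
          · rw [if_neg hst] at hq; exact ha q hq

lemma findCluePos_ok (clue : Int) (grid : List String) (p : Int × Int)
    (hp : findCluePos clue grid = some p) : pvCellOK grid p := by
  unfold findCluePos at hp
  rw [foldl_nested (pvScanStepA clue grid (grid.length : Int) (pvGridW grid))] at hp
  refine scan_fold_val clue grid (grid.length : Int) (pvGridW grid) le_rfl le_rfl _
    ((1 : Int), none) (fun q hq => by simp at hq) ?_ p hp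
  intro q hq
  simp only [List.mem_flatMap, List.mem_map] at hq
  obtain ⟨r, hr, c, hc, rfl⟩ := hq
  rw [PySem.List.mem_pyRange_one] at hr hc
  exact ⟨hr.2, hc.2⟩

-- the surviving prefix of a break loop over a range is a range
def pvSpanL (p : Int → Bool) (lo hi : Int) : List Int :=
  (PySem.List.pyRange lo hi 1).takeWhile (fun c => !p c)

lemma span_eq_range (p : Int → Bool) (lo hi : Int) :
    pvSpanL p lo hi = PySem.List.pyRange lo (lo + ((pvSpanL p lo hi).length : Int)) 1 := by
  have hpre : pvSpanL p lo hi <+: PySem.List.pyRange lo hi 1 := List.takeWhile_prefix _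
  have hlen : (pvSpanL p lo hi).length ≤ (PySem.List.pyRange lo hi 1).length := hpre.length_le
  rw [PySem.List.length_pyRange_one] at hlen
  have heq : pvSpanL p lo hi = (PySem.List.pyRange lo hi 1).take (pvSpanL p lo hi).length :=
    List.prefix_iff_eq_take.mp hpre
  by_cases hlo : lo ≤ hi
  · conv_lhs => rw [heq]
    rw [PySem.List.pyRange_one_append lo (lo + ((pvSpanL p lo hi).length : Int)) hi
      (by omega) (by omega)]
    rw [List.take_append_of_le_length (by rw [PySem.List.length_pyRange_one]; omega)]
    have h1 : ((pvSpanL p lo hi).length : Int) = (PySem.List.pyRange lo (lo + ((pvSpanL p lo hi).length : Int)) 1).length := by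
      rw [PySem.List.length_pyRange_one]; omega
    rw [List.take_of_length_le (by omega)]
  · have : PySem.List.pyRange lo hi 1 = [] := PySem.List.pyRange_one_eq_nil (by omega)
    have h0 : pvSpanL p lo hi = [] := by rw [pvSpanL, this]; rfl
    rw [h0]
    simp

lemma span_ne_nil (p : Int → Bool) (lo hi : Int) (hlt : lo < hi) (hp : ¬ p lo = true) :
    pvSpanL p lo hi ≠ [] := by
  rw [pvSpanL, PySem.List.pyRange_one_cons hlt, List.takeWhile_cons]
  simp [hp]

lemma foldl_count_len : ∀ (T : List Int) (n : Int),
    T.foldl (fun n _ => n + 1) n = n + (T.length : Int) := by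
  intro T
  induction T with
  | nil => intro n; simp
  | cons a T ih => intro n; simp [ih]; omega

-- lookup in a dict built by inserting distinct keys
lemma get?_fold_insert_of_ne {α κ ν : Type} [BEq κ] [LawfulBEq κ] (key : α → κ) (val : α → ν) :
    ∀ (L : List α) (d : PySem.Dict κ ν) (q : κ), (∀ a ∈ L, key a ≠ q) →
      (L.foldl (fun d a => d.insert (key a) (val a)) d).get? q = d.get? q := by
  intro L
  induction L with
  | nil => intros; rfl
  | cons a L ih =>
      intro d q hne0
      rw [List.foldl_cons, ih _ q (fun b hb => hne0 b (List.mem_cons_of_mem _ hb)),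
        PySem.Dict.get?_insert_of_ne d _ (Ne.symm (hne0 a List.mem_cons_self))]

lemma get?_fold_insert {α κ ν : Type} [BEq κ] [LawfulBEq κ] (key : α → κ) (val : α → ν) :
    ∀ (L : List α) (d : PySem.Dict κ ν) (q : κ), (L.map key).Nodup →
      (L.foldl (fun d a => d.insert (key a) (val a)) d).get? q =
        match L.find? (fun a => key a == q) with
        | some a => some (val a)
        | none => d.get? q := by
  intro L
  induction L with
  | nil => intros; rfl
  | cons a L ih =>
      intro d q hnd
      rw [List.map_cons, List.nodup_cons] at hnd
      rw [List.foldl_cons, List.find?_cons]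
      by_cases hk : key a == q
      · have hq : key a = q := by simpa using hk
        simp only [hk]
        rw [get?_fold_insert_of_ne key val L _ q ?_]
        · rw [← hq, PySem.Dict.get?_insert_self]
        · intro b hb hbq
          refine hnd.1 ?_
          rw [hq, ← hbq]
          exact List.mem_map_of_mem hb
      · simp only [Bool.not_eq_true] at hk
        simp only [hk]
        rw [ih _ q hnd.2]
        have hne : q ≠ key a := fun h => by simp [h] at hk
        cases hf : L.find? (fun b => key b == q) with
        | some b => rfl
        | none => simp only [PySem.Dict.get?_insert_of_ne d _ hne]

lemma find?_beq_int (b : Int) : ∀ (L : List Int),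
    L.find? (fun c => c == b) = if b ∈ L then some b else none := by
  intro L
  induction L with
  | nil => simp
  | cons a L ih =>
      by_cases hab : a = b
      · subst hab; simp
      · simp only [List.find?_cons, beq_eq_false_iff_ne.mpr hab, ih, List.mem_cons]
        simp [Ne.symm hab]

-- at most one index of an enumerated string can hit the single crossing cell
lemma enum_fold_nohit (Q : Prop) [Decidable Q] (K t : Int) :
    ∀ (chars : List Char) (s : Int) (c : PySem.Dict Int String), t < s →
      (PySem.List.enumerate chars s).foldl
        (fun c ic => if ic.1 = t ∧ Q then c.insert K (String.ofList [ic.2]) else c) c = c := by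
  intro chars
  induction chars with
  | nil => intro s c _; rfl
  | cons ch chars ih =>
      intro s c hts
      rw [PySem.List.enumerate_cons, List.foldl_cons]
      rw [if_neg (by rintro ⟨rfl, _⟩; omega)]
      exact ih (s + 1) c (by omega)

lemma enum_fold_single (Q : Prop) [Decidable Q] (K t : Int) :
    ∀ (chars : List Char) (s : Int) (c : PySem.Dict Int String),
      (PySem.List.enumerate chars s).foldl
        (fun c ic => if ic.1 = t ∧ Q then c.insert K (String.ofList [ic.2]) else c) c
      = if s ≤ t ∧ t < s + (chars.length : Int) ∧ Q then
          c.insert K (String.ofList [PySem.List.pyGetD chars (t - s) ' ']) else c := by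
  intro chars
  induction chars with
  | nil =>
      intro s c
      rw [if_neg (by rintro ⟨h1, h2, _⟩; simp only [List.length_nil, Nat.cast_zero] at h2; omega)]
      rfl
  | cons ch chars ih =>
      intro s c
      rw [PySem.List.enumerate_cons, List.foldl_cons]
      by_cases hst : s = t ∧ Q
      · obtain ⟨rfl, hQ⟩ := hst
        rw [if_pos ⟨rfl, hQ⟩, enum_fold_nohit Q K s chars (s + 1) _ (by omega)]
        rw [if_pos ⟨le_refl s, ⟨by simp only [List.length_cons]; push_cast; omega, hQ⟩⟩]
        simp
      · rw [if_neg hst, ih (s + 1) c]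
        by_cases hc : s + 1 ≤ t ∧ t < s + 1 + (chars.length : Int) ∧ Q
        · have hlen : t < s + (((ch :: chars).length : Nat) : Int) := by
            simp only [List.length_cons]; push_cast; omega
          rw [if_pos hc, if_pos ⟨by omega, hlen, hc.2.2⟩]
          have hk : t - s = ((t - (s + 1)).toNat + 1 : Nat) := by omega
          have hk1 : t - (s + 1) = ((t - (s + 1)).toNat : Int) := by omega
          rw [hk, hk1, PySem.List.pyGetD_natCast, PySem.List.pyGetD_natCast]
          have hmax : (max (t - (s + 1)) 0).toNat = (t - (s + 1)).toNat := by omega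
          simp [hmax]
        · have hneg : ¬(s ≤ t ∧ t < s + (((ch :: chars).length : Nat) : Int) ∧ Q) := by
            rintro ⟨h1, h2, hQ⟩
            simp only [List.length_cons] at h2
            rcases eq_or_lt_of_le h1 with rfl | hlt
            · exact hst ⟨rfl, hQ⟩
            · exact hc ⟨by omega, by push_cast at h2 ⊢; omega, hQ⟩
          rw [if_neg hc, if_neg hneg]


lemma breakcount (p : Int → Bool) (lo hi : Int) :
    pvBreakFold p (fun n (_ : Int) => n + 1) (PySem.List.pyRange lo hi 1) (0 : Int)
      = ((pvSpanL p lo hi).length : Int) := by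
  rw [pvBreakFold_eq, foldl_count_len]
  simp [pvSpanL]

lemma nodup_span (p : Int → Bool) (lo hi : Int) : (pvSpanL p lo hi).Nodup := by
  rw [span_eq_range]
  exact PySem.List.nodup_pyRange_one _ _

lemma breakfold_insert_get? (p : Int → Bool) (lo hi : Int) (key : Int → Int × Int) (val : Int → Int)
    (hinj : Function.Injective key) (q : Int × Int) :
    (pvBreakFold p (fun d c => d.insert (key c) (val c)) (PySem.List.pyRange lo hi 1)
        (PySem.Dict.empty : PySem.Dict (Int × Int) Int)).get? q
      = match (pvSpanL p lo hi).find? (fun c => key c == q) with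
        | some c => some (val c)
        | none => none := by
  rw [pvBreakFold_eq]
  rw [show List.takeWhile (fun c => !p c) (PySem.List.pyRange lo hi 1) = pvSpanL p lo hi from rfl]
  rw [get?_fold_insert key val _ _ q ((nodup_span p lo hi).map hinj)]
  cases (pvSpanL p lo hi).find? (fun c => key c == q) with
  | some c => rfl
  | none => exact PySem.Dict.get?_empty q

lemma find?_pairkey_row (row a b : Int) (L : List Int) :
    L.find? (fun c => ((row, c) : Int × Int) == (a, b))
      = if row = a then L.find? (fun c => c == b) else none := by
  by_cases h : row = a
  · subst h
    rw [if_pos rfl]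
    congr 1
    funext c
    simp [Prod.ext_iff]
  · rw [if_neg h]
    refine List.find?_eq_none.mpr (fun c _ => ?_)
    simp [Prod.ext_iff, h]

lemma find?_pairkey_col (col a b : Int) (L : List Int) :
    L.find? (fun r => ((r, col) : Int × Int) == (a, b))
      = if col = b then L.find? (fun r => r == a) else none := by
  by_cases h : col = b
  · subst h
    rw [if_pos rfl]
    congr 1
    funext r
    simp [Prod.ext_iff]
  · rw [if_neg h]
    refine List.find?_eq_none.mpr (fun r _ => ?_)
    simp [Prod.ext_iff, h]

lemma cellOff_get?_across (grid : List String) (row col a b : Int) :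
    (pvCellOff grid "across" row col).get? (a, b)
      = if a = row ∧ col ≤ b ∧ b < col +
            ((pvSpanL (fun c => pvCell grid row c == '.') col (pvGridW grid)).length : Int)
        then some (b - col) else none := by
  unfold pvCellOff
  rw [if_pos (by simp)]
  rw [breakfold_insert_get? _ _ _ _ _ (fun x y h => by simpa [Prod.ext_iff] using h) (a, b)]
  rw [find?_pairkey_row]
  set p : Int → Bool := fun c => pvCell grid row c == '.' with hp
  by_cases hra : row = a
  · rw [if_pos hra]
    rw [show (pvSpanL p col (pvGridW grid)).find? (fun c => c == b)
        = if b ∈ pvSpanL p col (pvGridW grid) then some b else none from find?_beq_int b _]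
    by_cases hb : b ∈ pvSpanL p col (pvGridW grid)
    · have hmem := hb
      rw [span_eq_range, PySem.List.mem_pyRange_one] at hmem
      rw [if_pos hb, if_pos ⟨hra.symm, hmem.1, hmem.2⟩]
    · have hmem : ¬(col ≤ b ∧ b < col + ((pvSpanL p col (pvGridW grid)).length : Int)) := by
        intro hc
        exact hb (by rw [span_eq_range, PySem.List.mem_pyRange_one]; exact hc)
      rw [if_neg hb, if_neg (by rintro ⟨_, h2, h3⟩; exact hmem ⟨h2, h3⟩)]
  · rw [if_neg hra, if_neg (by rintro ⟨h1, _⟩; exact hra h1.symm)]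

lemma cellOff_get?_down (grid : List String) (direction : String)
    (hd : (direction == "across") = false) (row col a b : Int) :
    (pvCellOff grid direction row col).get? (a, b)
      = if b = col ∧ row ≤ a ∧ a < row +
            ((pvSpanL (fun r => pvCell grid r col == '.') row ((grid.length : Nat) : Int)).length : Int)
        then some (a - row) else none := by
  unfold pvCellOff
  rw [if_neg (by simp [hd])]
  rw [breakfold_insert_get? _ _ _ _ _ (fun x y h => by simpa [Prod.ext_iff] using h) (a, b)]
  rw [find?_pairkey_col]
  set p : Int → Bool := fun r => pvCell grid r col == '.' with hp
  by_cases hcb : col = b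
  · rw [if_pos hcb]
    rw [show (pvSpanL p row ((grid.length : Nat) : Int)).find? (fun r => r == a)
        = if a ∈ pvSpanL p row ((grid.length : Nat) : Int) then some a else none from find?_beq_int a _]
    by_cases hb : a ∈ pvSpanL p row ((grid.length : Nat) : Int)
    · have hmem := hb
      rw [span_eq_range, PySem.List.mem_pyRange_one] at hmem
      rw [if_pos hb, if_pos ⟨hcb.symm, hmem.1, hmem.2⟩]
    · have hmem : ¬(row ≤ a ∧ a < row + ((pvSpanL p row ((grid.length : Nat) : Int)).length : Int)) := by
        intro hc
        exact hb (by rw [span_eq_range, PySem.List.mem_pyRange_one]; exact hc)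
      rw [if_neg hb, if_neg (by rintro ⟨_, h2, h3⟩; exact hmem ⟨h2, h3⟩)]
  · rw [if_neg hcb, if_neg (by rintro ⟨h1, _⟩; exact hcb h1.symm)]

-- ===== VERDICT (by name: the statement is the Claim_ definition above) =====
lemma across_item_eq (grid : List String) (row col r0 c0 : Int) (n : Nat) (chars : List Char)
    (hn : n = (pvSpanL (fun c => pvCell grid row c == '.') col (pvGridW grid)).length)
    (cons : PySem.Dict Int String) :
    (if decide (c0 ≥ col) && decide (c0 < col + (n : Int)) then
        if decide (r0 ≤ row) && decide (row < r0 + (chars.length : Int)) then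
          if decide (0 ≤ c0 - col) && decide (c0 - col < (n : Int)) &&
              decide (0 ≤ row - r0) && decide (row - r0 < (chars.length : Int)) then
            cons.insert (c0 - col) (String.ofList [PySem.List.pyGetD chars (row - r0) ' '])
          else cons
        else cons
      else cons)
    = (PySem.List.enumerate chars 0).foldl (fun cons ic =>
        match (pvCellOff grid "across" row col).get? (r0 + ic.1, c0) with
        | some off => cons.insert off (String.ofList [ic.2])
        | none => cons) cons := by
  have hstep : (fun (cons : PySem.Dict Int String) (ic : Int × Char) =>
      match (pvCellOff grid "across" row col).get? (r0 + ic.1, c0) with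
      | some off => cons.insert off (String.ofList [ic.2])
      | none => cons)
      = (fun (cons : PySem.Dict Int String) (ic : Int × Char) =>
          if ic.1 = (row - r0) ∧ (col ≤ c0 ∧ c0 < col + (n : Int)) then
            cons.insert (c0 - col) (String.ofList [ic.2]) else cons) := by
    funext cons ic
    rw [cellOff_get?_across, ← hn]
    by_cases h : r0 + ic.1 = row ∧ col ≤ c0 ∧ c0 < col + (n : Int)
    · rw [if_pos h, if_pos ⟨by omega, h.2⟩]
    · rw [if_neg h, if_neg (by rintro ⟨h1, h2⟩; exact h ⟨by omega, h2⟩)]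
  rw [hstep, enum_fold_single (col ≤ c0 ∧ c0 < col + (n : Int)) (c0 - col) (row - r0) chars 0 cons]
  simp only [Bool.and_eq_true, decide_eq_true_eq, sub_zero]
  split_ifs <;> first | rfl | (exfalso; omega)

lemma down_item_eq (grid : List String) (direction : String)
    (hd : (direction == "across") = false) (row col r0 c0 : Int) (n : Nat) (chars : List Char)
    (hn : n = (pvSpanL (fun r => pvCell grid r col == '.') row ((grid.length : Nat) : Int)).length)
    (cons : PySem.Dict Int String) :
    (if decide (r0 ≥ row) && decide (r0 < row + (n : Int)) then
        if decide (c0 ≤ col) && decide (col < c0 + (chars.length : Int)) then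
          if decide (0 ≤ r0 - row) && decide (r0 - row < (n : Int)) &&
              decide (0 ≤ col - c0) && decide (col - c0 < (chars.length : Int)) then
            cons.insert (r0 - row) (String.ofList [PySem.List.pyGetD chars (col - c0) ' '])
          else cons
        else cons
      else cons)
    = (PySem.List.enumerate chars 0).foldl (fun cons ic =>
        match (pvCellOff grid direction row col).get? (r0, c0 + ic.1) with
        | some off => cons.insert off (String.ofList [ic.2])
        | none => cons) cons := by
  have hstep : (fun (cons : PySem.Dict Int String) (ic : Int × Char) =>
      match (pvCellOff grid direction row col).get? (r0, c0 + ic.1) with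
      | some off => cons.insert off (String.ofList [ic.2])
      | none => cons)
      = (fun (cons : PySem.Dict Int String) (ic : Int × Char) =>
          if ic.1 = (col - c0) ∧ (row ≤ r0 ∧ r0 < row + (n : Int)) then
            cons.insert (r0 - row) (String.ofList [ic.2]) else cons) := by
    funext cons ic
    rw [cellOff_get?_down grid direction hd, ← hn]
    by_cases h : c0 + ic.1 = col ∧ row ≤ r0 ∧ r0 < row + (n : Int)
    · rw [if_pos h, if_pos ⟨by omega, h.2⟩]
    · rw [if_neg h, if_neg (by rintro ⟨h1, h2⟩; exact h ⟨by omega, h2⟩)]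
  rw [hstep, enum_fold_single (row ≤ r0 ∧ r0 < row + (n : Int)) (r0 - row) (col - c0) chars 0 cons]
  simp only [Bool.and_eq_true, decide_eq_true_eq, sub_zero]
  split_ifs <;> first | rfl | (exfalso; omega)

theorem get_crossing_constraints_spec : Claim_equal_get_crossing_constraints := by
  unfold Claim_equal_get_crossing_constraints
  intro clue direction answers grid _hdom _hpre
  unfold Spec_get_crossing_constraints get_crossing_constraints get_crossing_constraints_alt clueLen
  simp only [findCluePos_eq_positions]
  cases hpos : (pvPositions grid).get? clue with
  | none => rfl
  | some rc =>
      obtain ⟨row, col⟩ := rc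
      have hok : pvCellOK grid (row, col) :=
        findCluePos_ok clue grid (row, col) (by rw [findCluePos_eq_positions, hpos])
      simp only
      by_cases hd : (direction == "across") = true
      · have hdir : direction = "across" := by simpa using hd
        subst hdir
        simp only [beq_self_eq_true, if_true,
          breakcount (fun c => pvCell grid row c == '.') col (pvGridW grid)]
        have hnz : (pvSpanL (fun c => pvCell grid row c == '.') col (pvGridW grid)).length ≠ 0 := by
          have := span_ne_nil (fun c => pvCell grid row c == '.') col (pvGridW grid)
            hok.2.2 (by exact hok.1)
          simpa [List.length_eq_zero_iff] using this
        rw [if_neg (by simp only [beq_iff_eq, Int.natCast_eq_zero]; exact hnz)]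
        apply congrArg PySem.Dict.items
        apply PySem.List.foldl_congr_mem
        intro cons item _
        by_cases hcd : (item.1.2 == "across") = true
        · simp only [hcd, if_true]
        · simp only [hcd, Bool.false_eq_true, if_false]
          cases hp2 : (pvPositions grid).get? item.1.1 with
          | none => rfl
          | some rc2 =>
              obtain ⟨r0, c0⟩ := rc2
              simp only
              exact across_item_eq grid row col r0 c0 _ item.2.toList rfl cons
      · have hd' : (direction == "across") = false := by simpa using hd
        simp only [hd', Bool.false_eq_true, if_false,
          breakcount (fun r => pvCell grid r col == '.') row ((grid.length : Nat) : Int)]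
        have hnz : (pvSpanL (fun r => pvCell grid r col == '.') row ((grid.length : Nat) : Int)).length ≠ 0 := by
          have := span_ne_nil (fun r => pvCell grid r col == '.') row ((grid.length : Nat) : Int)
            hok.2.1 (by exact hok.1)
          simpa [List.length_eq_zero_iff] using this
        rw [if_neg (by simp only [beq_iff_eq, Int.natCast_eq_zero]; exact hnz)]
        apply congrArg PySem.Dict.items
        apply PySem.List.foldl_congr_mem
        intro cons item _
        by_cases hcd : (item.1.2 == direction) = true
        · simp only [hcd, if_true]
        · simp only [hcd, Bool.false_eq_true, if_false]
          cases hp2 : (pvPositions grid).get? item.1.1 with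
          | none => rfl
          | some rc2 =>
              obtain ⟨r0, c0⟩ := rc2
              simp only
              exact down_item_eq grid direction hd' row col r0 c0 _ item.2.toList rfl cons
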